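-- pv_equiv track=rewrite | github.com/Snorfermino/intek | order_words/order_words.py | order_words
-- ===== SOURCE A (Python) =====
-- def order_words(arr):
--     resultArr = []
--     if not arr:
--         return [[]]
--     else:
--         for i in arr:
--             if sorted(list(filter(lambda a: len(a) == len(i), arr))) not in resultArr:
--                 resultArr.append(sorted(list(filter(lambda a: len(a) == len(i), arr))))
--
--         return sorted(resultArr, key=lambda x: len(x[0]))
-- ===== SOURCE B (Python) =====
-- def order_words(arr):
--     # Bucket words by length once, sort each bucket once, emit buckets by increasing length.
--     if not arr:
--         return [[]]
--     buckets = {}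
--     for w in arr:
--         buckets.setdefault(len(w), []).append(w)
--     return [sorted(buckets[L]) for L in sorted(buckets)]
-- ===== Notes on version B (the rewrite author's own statement) =====
-- stated objective: faster
-- what changed: B buckets the words by length in one dict pass and sorts each bucket once, instead of A's per-word filter+sort over the whole list with a list-membership dedup.
import Mathlib
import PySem

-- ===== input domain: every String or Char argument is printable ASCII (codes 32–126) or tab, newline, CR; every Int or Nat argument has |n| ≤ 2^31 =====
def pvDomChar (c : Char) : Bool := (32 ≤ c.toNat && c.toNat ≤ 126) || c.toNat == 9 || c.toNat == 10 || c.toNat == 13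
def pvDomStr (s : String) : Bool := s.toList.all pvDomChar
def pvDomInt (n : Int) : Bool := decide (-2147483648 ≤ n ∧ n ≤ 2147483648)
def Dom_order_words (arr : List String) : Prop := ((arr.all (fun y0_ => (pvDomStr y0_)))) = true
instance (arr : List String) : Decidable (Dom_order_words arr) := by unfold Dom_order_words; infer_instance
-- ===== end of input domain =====

-- B buckets the words by length in one dict pass and sorts each bucket once (instead of A's
-- per-word filter+sort over the whole list with a list-membership dedup); measured objective: faster.

-- ===== PORT A =====
def order_words (arr : List String) : List (List String) :=
  if arr = [] then [[]]
  else
    let resultArr := arr.foldl (fun resultArr i =>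
      let g := PySem.List.sorted (arr.filter (fun a => a.length == i.length)) (fun x => x) false
      if g ∈ resultArr then resultArr else resultArr ++ [g]) []
    -- key len(x[0]): every element of resultArr is nonempty (it contains its generator i), so x[0] is headD ""
    PySem.List.sorted resultArr (fun x => ((x.headD "").length : Int)) false

-- ===== PORT B =====
def order_words_alt (arr : List String) : List (List String) :=
  if arr = [] then [[]]
  else
    let buckets : PySem.Dict Int (List String) :=
      arr.foldl (fun d w => d.modify (w.length : Int) [] (· ++ [w])) PySem.Dict.empty
    (PySem.List.sorted buckets.keys (fun x => x) false).map
      (fun L => PySem.List.sorted (buckets.getD L []) (fun x => x) false)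

-- ===== PRECONDITION & SPEC =====
def Spec_order_words (arr : List String) (out : List (List String)) : Prop := out = order_words_alt arr
instance (arr : List String) (out : List (List String)) : Decidable (Spec_order_words arr out) := by unfold Spec_order_words; infer_instance

-- ===== CLAIM (what is proved, stated in full; the proofs are below) =====
def Claim_equal_order_words : Prop := ∀ (arr : List String), Dom_order_words arr → Spec_order_words arr (order_words arr)

-- ===== LEMMAS AND PROOFS =====

-- the (sorted) group of all words of arr of length L
def glen (arr : List String) (L : Int) : List String :=
  PySem.List.sorted (arr.filter (fun a => ((a.length : Int) == L))) (fun x => x) false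

theorem mem_glen {arr : List String} {L : Int} {a : String} :
    a ∈ glen arr L ↔ a ∈ arr ∧ (a.length : Int) = L := by
  simp [glen, PySem.List.mem_sorted, List.mem_filter]

theorem key_glen {arr : List String} {L : Int} (h : ∃ a ∈ arr, (a.length : Int) = L) :
    ((((glen arr L).headD "").length : Int)) = L := by
  obtain ⟨a, ha, hl⟩ := h
  have hmem : a ∈ glen arr L := mem_glen.mpr ⟨ha, hl⟩
  cases hg : glen arr L with
  | nil => rw [hg] at hmem; cases hmem
  | cons h t =>
      have : h ∈ glen arr L := by rw [hg]; exact List.mem_cons_self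
      simpa using (mem_glen.mp this).2

theorem filterA_eq (arr : List String) (i : String) :
    arr.filter (fun a => a.length == i.length)
      = arr.filter (fun a => ((a.length : Int) == (i.length : Int))) := by
  apply List.filter_congr
  intro a _
  simp

theorem mem_map_glen {arr : List String} {i : String} (hi : i ∈ arr) (S : List Int) :
    glen arr (i.length : Int) ∈ S.map (glen arr) ↔ ((i.length : Int)) ∈ S := by
  constructor
  · intro h
    obtain ⟨L, hL, hEq⟩ := List.mem_map.mp h
    have : i ∈ glen arr L := by
      rw [hEq]; exact mem_glen.mpr ⟨hi, rfl⟩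
    have := (mem_glen.mp this).2
    rwa [this]
  · intro h
    exact List.mem_map.mpr ⟨_, h, rfl⟩

theorem loopA (arr : List String) : ∀ (l : List String) (S : List Int),
    (∀ x ∈ l, x ∈ arr) →
    l.foldl (fun res i =>
        if glen arr (i.length : Int) ∈ res then res else res ++ [glen arr (i.length : Int)])
      (S.map (glen arr))
      = (PySem.Set.update S (l.map (fun i => ((i.length : Int))))).map (glen arr) := by
  intro l
  induction l with
  | nil => intro S _; simp [PySem.Set.update]
  | cons i l ih =>
      intro S hl
      have hi : i ∈ arr := hl i (by simp)
      have hrest : ∀ x ∈ l, x ∈ arr := fun x hx => hl x (by simp [hx])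
      simp only [List.foldl_cons, List.map_cons, PySem.Set.update, PySem.Set.add]
      by_cases hmem : ((i.length : Int)) ∈ S
      · rw [if_pos ((mem_map_glen hi S).mpr hmem)]
        have hc : PySem.Set.contains S ((i.length : Int)) = true := by
          simpa [PySem.Set.contains] using hmem
        rw [hc]
        simpa [PySem.Set.update] using ih S hrest
      · rw [if_neg (fun h => hmem ((mem_map_glen hi S).mp h))]
        have hc : PySem.Set.contains S ((i.length : Int)) = false := by
          simpa [PySem.Set.contains] using hmem
        rw [hc]
        have := ih (S ++ [((i.length : Int))]) hrest
        simpa [PySem.Set.update] using this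

theorem bucket_getD (arr : List String) (L : Int) :
    (arr.foldl (fun d w => d.modify (w.length : Int) [] (· ++ [w])) PySem.Dict.empty).getD L []
      = arr.filter (fun a => ((a.length : Int) == L)) := by
  have h : arr.foldl (fun d w => d.modify (w.length : Int) [] (· ++ [w])) PySem.Dict.empty
      = (arr.map (fun w => (((w.length : Int)), w))).foldl
          (fun d p => d.modify p.1 [] (· ++ [p.2])) PySem.Dict.empty := by
    rw [List.foldl_map]
  rw [h, PySem.Dict.getD_foldl_modify_append]
  simp [List.filter_map, Function.comp_def]

theorem bucket_keys (arr : List String) :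
    (arr.foldl (fun d w => d.modify (w.length : Int) [] (· ++ [w])) PySem.Dict.empty).keys
      = PySem.Set.ofList (arr.map (fun w => ((w.length : Int)))) := by
  have := PySem.Dict.keys_foldl_modify_key (l := arr) (key := fun w => ((w.length : Int)))
    (d0 := ([] : List String)) (f := fun _ w => (· ++ [w])) (d := PySem.Dict.empty)
  simpa [PySem.Set.update, PySem.Set.ofList] using this

-- ===== VERDICT (by name: the statement is the Claim_ definition above) =====
theorem order_words_spec : Claim_equal_order_words := by
  intro arr _
  unfold Spec_order_words order_words order_words_alt
  by_cases harr : arr = []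
  · simp [harr]
  · simp only [if_neg harr]
    -- rewrite A's loop body to glen form
    have hbody : (fun (resultArr : List (List String)) (i : String) =>
        let g := PySem.List.sorted (arr.filter (fun a => a.length == i.length)) (fun x => x) false
        if g ∈ resultArr then resultArr else resultArr ++ [g])
        = (fun res i =>
            if glen arr (i.length : Int) ∈ res then res else res ++ [glen arr (i.length : Int)]) := by
      funext res i
      simp only [glen, filterA_eq arr i]
    rw [hbody]
    have hloop := loopA arr arr [] (fun x hx => hx)
    simp only [List.map_nil] at hloop
    rw [hloop]
    simp only [bucket_getD, bucket_keys]
    set K := PySem.Set.ofList (arr.map (fun w => ((w.length : Int)))) with hK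
    have hreal : ∀ L ∈ K, ∃ a ∈ arr, (a.length : Int) = L := by
      intro L hL
      rw [hK, PySem.Set.mem_ofList] at hL
      obtain ⟨a, ha, hEq⟩ := List.mem_map.mp hL
      exact ⟨a, ha, hEq⟩
    have hupd : PySem.Set.update ([] : List Int) (arr.map (fun w => ((w.length : Int)))) = K := rfl
    rw [hupd]
    -- RHS map body is glen
    have hmapb : (fun L => PySem.List.sorted (arr.filter (fun a => ((a.length : Int) == L))) (fun x => x) false)
        = glen arr := rfl
    rw [hmapb]
    apply PySem.List.sorted_eq_of_perm_of_pairwise_lt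
    · exact ((PySem.List.sorted_perm K (fun x => x) false)).map (glen arr)
    · rw [List.pairwise_map]
      have hp : (PySem.List.sorted K (fun x => x) false).Pairwise (· < ·) := by
        simpa [hK] using PySem.List.sorted_ofList_pairwise_lt (xs := arr.map (fun w => ((w.length : Int))))
      refine hp.imp_of_mem ?_
      intro a b ha hb hab
      have ha' : a ∈ K := (PySem.List.mem_sorted _ _ _ _).mp ha
      have hb' : b ∈ K := (PySem.List.mem_sorted _ _ _ _).mp hb
      rw [key_glen (hreal a ha'), key_glen (hreal b hb')]
      exact hab
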